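-- pv_equiv track=rewrite | github.com/hbajohr/megawatt-deutsch | megawatt.py | vorfahren
-- ===== SOURCE A (Python) =====
-- def vorfahren(erste_liste, zweite_liste, tiefe):
--     if tiefe < 1:
--         return
--     nl1 = []
--     for e in erste_liste:
--         for f in zweite_liste:
--              nl1.append(f+e)
--              yield nl1[-1]
--     yield ' und'.join(vorfahren(nl1,zweite_liste,tiefe-1))
-- ===== SOURCE B (Python) =====
-- def vorfahren(erste_liste, zweite_liste, tiefe):
--     # Iterative forward chain of combination-lists; trailing string assembled as a
--     # streaming concatenation instead of nested recursive joins.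
--     if tiefe < 1:
--         return
--     nl1 = [f + e for e in erste_liste for f in zweite_liste]
--     yield from nl1
--     parts = []
--     cur = nl1
--     for _ in range(tiefe - 1):
--         cur = [f + e for e in cur for f in zweite_liste]
--         if not cur:
--             break
--         parts.append(' und'.join(cur) + ' und')
--     yield ''.join(parts)
-- ===== Notes on version B (the rewrite author's own statement) =====
-- stated objective: alternative
-- what changed: Replaced A's recursive generator by an iterative forward chain of combination-lists whose trailing string is assembled as a flat forward concatenation of per-level joins (with an early stop once the chain is empty), instead of A's nested recursive ' und'.join calls.
import Mathlib
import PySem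

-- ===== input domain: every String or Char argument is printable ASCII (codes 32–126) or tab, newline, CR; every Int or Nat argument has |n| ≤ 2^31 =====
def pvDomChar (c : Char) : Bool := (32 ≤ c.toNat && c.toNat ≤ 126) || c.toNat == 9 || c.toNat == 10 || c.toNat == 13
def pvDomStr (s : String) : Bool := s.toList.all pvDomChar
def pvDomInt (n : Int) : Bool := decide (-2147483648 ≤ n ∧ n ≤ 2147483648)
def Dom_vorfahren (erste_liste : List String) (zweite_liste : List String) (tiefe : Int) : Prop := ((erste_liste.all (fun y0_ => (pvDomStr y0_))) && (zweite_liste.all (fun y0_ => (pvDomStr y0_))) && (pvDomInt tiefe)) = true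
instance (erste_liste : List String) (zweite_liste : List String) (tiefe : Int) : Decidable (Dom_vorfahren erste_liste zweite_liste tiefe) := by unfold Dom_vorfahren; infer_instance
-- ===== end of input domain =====

-- B replaces A's recursive generator by an iterative forward chain of combination-lists whose
-- trailing string is a flat forward concatenation (alternative decomposition; return values only).
-- Both ports work over List Char (PySem.Chars), converting at the boundary, so string ops are exact.

-- the separator ' und'
def pvUnd : List Char := [' ', 'u', 'n', 'd']

-- ===== PORT A =====
-- A is a generator; its port returns the list of yielded values.
-- structural recursion on tiefe.toNat (tiefe < 1, i.e. toNat = 0, is the 'return' branch)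
def vorfahrenC (erste : List (List Char)) (zweite : List (List Char)) : Nat → List (List Char)
  | 0 => []
  | n + 1 =>
    -- nested for-loops appending f+e, each appended value yielded
    let nl1 := erste.foldl (fun acc e => zweite.foldl (fun acc2 f => acc2 ++ [f ++ e]) acc) []
    nl1 ++ [PySem.Chars.join pvUnd (vorfahrenC nl1 zweite n)]

def vorfahren (erste_liste : List String) (zweite_liste : List String) (tiefe : Int) : List String :=
  (vorfahrenC (erste_liste.map String.toList) (zweite_liste.map String.toList) tiefe.toNat).map String.ofList

-- ===== PORT B =====
-- [f + e for e in L for f in zweite]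
def pvCombos (zweite : List (List Char)) (L : List (List Char)) : List (List Char) :=
  L.flatMap (fun e => zweite.map (fun f => f ++ e))

-- the loop 'cur = combos(cur); if not cur: break; parts.append(join(cur) + " und")', concatenated
def pvTrailB (zweite : List (List Char)) (cur : List (List Char)) : Nat → List Char
  | 0 => []
  | n + 1 =>
    let c := pvCombos zweite cur
    if c = [] then []
    else PySem.Chars.join pvUnd c ++ pvUnd ++ pvTrailB zweite c n

def vorfahren_alt (erste_liste : List String) (zweite_liste : List String) (tiefe : Int) : List String :=
  if tiefe < 1 then []
  else
    let zc := zweite_liste.map String.toList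
    let nl1 := pvCombos zc (erste_liste.map String.toList)
    (nl1 ++ [pvTrailB zc nl1 (tiefe - 1).toNat]).map String.ofList

-- ===== PRECONDITION & SPEC =====
def Spec_vorfahren (erste_liste : List String) (zweite_liste : List String) (tiefe : Int) (out : List String) : Prop := out = vorfahren_alt erste_liste zweite_liste tiefe
instance (erste_liste : List String) (zweite_liste : List String) (tiefe : Int) (out : List String) : Decidable (Spec_vorfahren erste_liste zweite_liste tiefe out) := by unfold Spec_vorfahren; infer_instance

-- ===== CLAIM (what is proved, stated in full; the proofs are below) =====
def Claim_equal_vorfahren : Prop := ∀ (erste_liste : List String) (zweite_liste : List String) (tiefe : Int), Dom_vorfahren erste_liste zweite_liste tiefe → Spec_vorfahren erste_liste zweite_liste tiefe (vorfahren erste_liste zweite_liste tiefe)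

-- ===== LEMMAS AND PROOFS =====

lemma pvFlatMapSingleton (z : List (List Char)) (a : List Char) :
    z.flatMap (fun f => [f ++ a]) = z.map (fun f => f ++ a) := by
  induction z with
  | nil => rfl
  | cons b z ih => simp [ih]

-- A's nested append loop builds exactly the combination list
lemma pvNl1_eq (z : List (List Char)) (L acc : List (List Char)) :
    L.foldl (fun acc e => z.foldl (fun acc2 f => acc2 ++ [f ++ e]) acc) acc
      = acc ++ pvCombos z L := by
  induction L generalizing acc with
  | nil => simp [pvCombos]
  | cons a L ih =>
    simp only [List.foldl_cons, ih, pvCombos, List.flatMap_cons]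
    rw [PySem.List.foldl_append_eq_flatMap (g := fun f => [f ++ a])]
    simp [pvFlatMapSingleton]

lemma pvCharsJoinLast (sep s : List Char) (c : List (List Char)) :
    PySem.Chars.join sep (c ++ [s]) = if c = [] then s else PySem.Chars.join sep c ++ sep ++ s := by
  induction c with
  | nil => simp [PySem.Chars.join_singleton]
  | cons a c ih =>
    cases c with
    | nil => simp [PySem.Chars.join_cons_cons, PySem.Chars.join_singleton]
    | cons b c' =>
      simp only [List.cons_append, PySem.Chars.join_cons_cons] at ih ⊢
      simp only [reduceCtorEq, ite_false] at ih ⊢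
      rw [ih]; simp [List.append_assoc]

lemma pvTrailB_nil (z : List (List Char)) (n : Nat) : pvTrailB z [] n = [] := by
  cases n with
  | zero => rfl
  | succ n => simp [pvTrailB, pvCombos]

lemma pvTrail (n : Nat) : ∀ (z L : List (List Char)),
    PySem.Chars.join pvUnd (vorfahrenC L z n) = pvTrailB z L n := by
  induction n with
  | zero => intro z L; rfl
  | succ n ih =>
    intro z L
    rw [vorfahrenC]
    simp only [pvNl1_eq, List.nil_append]
    rw [pvCharsJoinLast, ih z (pvCombos z L)]
    by_cases hc : pvCombos z L = []
    · rw [if_pos hc, pvTrailB]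
      simp only [hc, pvTrailB_nil, if_true]
    · rw [if_neg hc, pvTrailB]
      simp only [if_neg hc]

theorem pvMainC (e z : List (List Char)) (n : Nat) :
    vorfahrenC e z (n + 1) = pvCombos z e ++ [pvTrailB z (pvCombos z e) n] := by
  rw [vorfahrenC]
  simp only [pvNl1_eq, List.nil_append]
  rw [pvTrail n z (pvCombos z e)]

-- ===== VERDICT (by name: the statement is the Claim_ definition above) =====
theorem vorfahren_spec : Claim_equal_vorfahren := by
  intro e z t _
  show vorfahren e z t = vorfahren_alt e z t
  rw [vorfahren, vorfahren_alt]
  by_cases h : t < 1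
  · rw [if_pos h]
    have h0 : t.toNat = 0 := by omega
    rw [h0, vorfahrenC]; rfl
  · rw [if_neg h]
    have h1 : t.toNat = (t - 1).toNat + 1 := by omega
    rw [h1, pvMainC]
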